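-- pv_equiv track=rewrite | github.com/CAUCORASEKO/Deterministic-Vault-Factory | engine/policy/decision_engine.py | determine_recommendation
-- ===== SOURCE A (Python) =====
-- def determine_recommendation(policy_flags: list[str]) -> tuple[str, str]:
--     if any(f in policy_flags for f in [
--         "risk_acceptance_not_signed",
--         "formal_model_missing",
--         "spec_missing",
--         "emergency_mechanism_missing",
--     ]):
--         return "REJECT", "CRITICAL"
--
--     if "governance_latency_exceeded" in policy_flags:
--         return "ESCALATE", "HIGH"
--
--     if any(f in policy_flags for f in ["low_liquidity", "monitoring_not_defined"]):
--         return "CONDITIONAL", "MEDIUM"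
--
--     return "APPROVE", "LOW"
-- ===== SOURCE B (Python) =====
-- _PRIORITY = {
--     "risk_acceptance_not_signed": (3, ("REJECT", "CRITICAL")),
--     "formal_model_missing": (3, ("REJECT", "CRITICAL")),
--     "spec_missing": (3, ("REJECT", "CRITICAL")),
--     "emergency_mechanism_missing": (3, ("REJECT", "CRITICAL")),
--     "governance_latency_exceeded": (2, ("ESCALATE", "HIGH")),
--     "low_liquidity": (1, ("CONDITIONAL", "MEDIUM")),
--     "monitoring_not_defined": (1, ("CONDITIONAL", "MEDIUM")),
-- }
--
--
-- def determine_recommendation(policy_flags: list[str]) -> tuple[str, str]: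
--     best_rank = 0
--     best = ("APPROVE", "LOW")
--     for f in policy_flags:
--         entry = _PRIORITY.get(f)
--         if entry is not None and entry[0] > best_rank:
--             best_rank, best = entry
--     return best
-- ===== Notes on version B (the rewrite author's own statement) =====
-- stated objective: alternative
-- what changed: Replaces the fixed cascade of ordered membership tests (each scanning policy_flags) with a single pass over policy_flags that keeps a running maximum priority taken from a flag->(rank,result) table.
import Mathlib
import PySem

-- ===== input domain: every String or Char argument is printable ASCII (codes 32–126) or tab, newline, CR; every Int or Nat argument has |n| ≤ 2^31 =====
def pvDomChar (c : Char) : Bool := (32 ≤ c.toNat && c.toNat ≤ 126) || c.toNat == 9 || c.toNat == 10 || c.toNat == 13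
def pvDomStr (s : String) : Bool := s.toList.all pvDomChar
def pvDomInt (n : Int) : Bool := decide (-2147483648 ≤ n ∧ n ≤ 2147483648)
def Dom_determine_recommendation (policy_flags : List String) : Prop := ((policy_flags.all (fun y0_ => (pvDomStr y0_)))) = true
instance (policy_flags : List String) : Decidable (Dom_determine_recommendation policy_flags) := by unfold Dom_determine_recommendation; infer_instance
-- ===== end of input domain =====

-- B replaces A's fixed cascade of membership tests by one running-max scan over a flag->(rank,result) table (alternative structure, same results).

-- ===== PORT A =====
def determine_recommendation (policy_flags : List String) : String × String :=
  if ["risk_acceptance_not_signed", "formal_model_missing", "spec_missing",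
      "emergency_mechanism_missing"].any (fun f => policy_flags.contains f) then
    ("REJECT", "CRITICAL")
  else if policy_flags.contains "governance_latency_exceeded" then
    ("ESCALATE", "HIGH")
  else if ["low_liquidity", "monitoring_not_defined"].any (fun f => policy_flags.contains f) then
    ("CONDITIONAL", "MEDIUM")
  else
    ("APPROVE", "LOW")

-- ===== PORT B =====
def pvPriority : PySem.Dict String (Nat × (String × String)) :=
  PySem.Dict.ofList
    [("risk_acceptance_not_signed", (3, ("REJECT", "CRITICAL"))),
     ("formal_model_missing", (3, ("REJECT", "CRITICAL"))),
     ("spec_missing", (3, ("REJECT", "CRITICAL"))),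
     ("emergency_mechanism_missing", (3, ("REJECT", "CRITICAL"))),
     ("governance_latency_exceeded", (2, ("ESCALATE", "HIGH"))),
     ("low_liquidity", (1, ("CONDITIONAL", "MEDIUM"))),
     ("monitoring_not_defined", (1, ("CONDITIONAL", "MEDIUM")))]

def determine_recommendation_alt (policy_flags : List String) : String × String :=
  (policy_flags.foldl
    (fun acc f =>
      match PySem.Dict.get? pvPriority f with
      | some e => if e.1 > acc.1 then e else acc
      | none => acc)
    (0, ("APPROVE", "LOW"))).2

-- ===== PRECONDITION & SPEC =====
def Spec_determine_recommendation (policy_flags : List String) (out : String × String) : Prop := out = determine_recommendation_alt policy_flags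
instance (policy_flags : List String) (out : String × String) : Decidable (Spec_determine_recommendation policy_flags out) := by unfold Spec_determine_recommendation; infer_instance

-- ===== CLAIM (what is proved, stated in full; the proofs are below) =====
def Claim_equal_determine_recommendation : Prop := ∀ (policy_flags : List String), Dom_determine_recommendation policy_flags → Spec_determine_recommendation policy_flags (determine_recommendation policy_flags)

-- ===== LEMMAS AND PROOFS =====

-- rank of a flag (0 for unknown flags)
def pvRk (f : String) : Nat :=
  match PySem.Dict.get? pvPriority f with
  | some e => e.1
  | none => 0

-- the result attached to a rank
def pvRes (r : Nat) : String × String :=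
  if r = 3 then ("REJECT", "CRITICAL")
  else if r = 2 then ("ESCALATE", "HIGH")
  else if r = 1 then ("CONDITIONAL", "MEDIUM")
  else ("APPROVE", "LOW")

-- maximum rank occurring in the list
def pvMaxR (l : List String) : Nat := l.foldr (fun f m => max (pvRk f) m) 0

lemma pvMaxR_cons (f : String) (l : List String) :
    pvMaxR (f :: l) = max (pvRk f) (pvMaxR l) := rfl

lemma pv_get_eq (f : String) :
    PySem.Dict.get? pvPriority f =
      if pvRk f = 0 then none else some (pvRk f, pvRes (pvRk f)) := by
  have hd : pvPriority = PySem.Dict.mk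
    [("risk_acceptance_not_signed", (3, ("REJECT", "CRITICAL"))),
     ("formal_model_missing", (3, ("REJECT", "CRITICAL"))),
     ("spec_missing", (3, ("REJECT", "CRITICAL"))),
     ("emergency_mechanism_missing", (3, ("REJECT", "CRITICAL"))),
     ("governance_latency_exceeded", (2, ("ESCALATE", "HIGH"))),
     ("low_liquidity", (1, ("CONDITIONAL", "MEDIUM"))),
     ("monitoring_not_defined", (1, ("CONDITIONAL", "MEDIUM")))] := by decide
  unfold pvRk
  rw [hd]
  unfold PySem.Dict.get?
  simp only [List.find?]
  by_cases h1 : "risk_acceptance_not_signed" = f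
  · subst h1; decide
  by_cases h2 : "formal_model_missing" = f
  · subst h2; decide
  by_cases h3 : "spec_missing" = f
  · subst h3; decide
  by_cases h4 : "emergency_mechanism_missing" = f
  · subst h4; decide
  by_cases h5 : "governance_latency_exceeded" = f
  · subst h5; decide
  by_cases h6 : "low_liquidity" = f
  · subst h6; decide
  by_cases h7 : "monitoring_not_defined" = f
  · subst h7; decide
  have e1 : ("risk_acceptance_not_signed" == f) = false := by simp [h1]
  have e2 : ("formal_model_missing" == f) = false := by simp [h2]
  have e3 : ("spec_missing" == f) = false := by simp [h3]
  have e4 : ("emergency_mechanism_missing" == f) = false := by simp [h4]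
  have e5 : ("governance_latency_exceeded" == f) = false := by simp [h5]
  have e6 : ("low_liquidity" == f) = false := by simp [h6]
  have e7 : ("monitoring_not_defined" == f) = false := by simp [h7]
  simp [e1, e2, e3, e4, e5, e6, e7]

lemma pv_rk_val (f : String) :
    pvRk f =
      if f = "risk_acceptance_not_signed" ∨ f = "formal_model_missing" ∨ f = "spec_missing" ∨
          f = "emergency_mechanism_missing" then 3
      else if f = "governance_latency_exceeded" then 2
      else if f = "low_liquidity" ∨ f = "monitoring_not_defined" then 1
      else 0 := by
  unfold pvRk
  have hd : pvPriority = PySem.Dict.mk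
    [("risk_acceptance_not_signed", (3, ("REJECT", "CRITICAL"))),
     ("formal_model_missing", (3, ("REJECT", "CRITICAL"))),
     ("spec_missing", (3, ("REJECT", "CRITICAL"))),
     ("emergency_mechanism_missing", (3, ("REJECT", "CRITICAL"))),
     ("governance_latency_exceeded", (2, ("ESCALATE", "HIGH"))),
     ("low_liquidity", (1, ("CONDITIONAL", "MEDIUM"))),
     ("monitoring_not_defined", (1, ("CONDITIONAL", "MEDIUM")))] := by decide
  rw [hd]
  unfold PySem.Dict.get?
  simp only [List.find?]
  by_cases h1 : "risk_acceptance_not_signed" = f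
  · subst h1; decide
  by_cases h2 : "formal_model_missing" = f
  · subst h2; decide
  by_cases h3 : "spec_missing" = f
  · subst h3; decide
  by_cases h4 : "emergency_mechanism_missing" = f
  · subst h4; decide
  by_cases h5 : "governance_latency_exceeded" = f
  · subst h5; decide
  by_cases h6 : "low_liquidity" = f
  · subst h6; decide
  by_cases h7 : "monitoring_not_defined" = f
  · subst h7; decide
  have e1 : ("risk_acceptance_not_signed" == f) = false := by simp [h1]
  have e2 : ("formal_model_missing" == f) = false := by simp [h2]
  have e3 : ("spec_missing" == f) = false := by simp [h3]
  have e4 : ("emergency_mechanism_missing" == f) = false := by simp [h4]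
  have e5 : ("governance_latency_exceeded" == f) = false := by simp [h5]
  have e6 : ("low_liquidity" == f) = false := by simp [h6]
  have e7 : ("monitoring_not_defined" == f) = false := by simp [h7]
  simp [e1, e2, e3, e4, e5, e6, e7, Ne.symm h1, Ne.symm h2, Ne.symm h3, Ne.symm h4,
    Ne.symm h5, Ne.symm h6, Ne.symm h7]

lemma pvRk_le (f : String) : pvRk f ≤ 3 := by
  rw [pv_rk_val f]; split_ifs <;> omega

lemma pv_rk3 (f : String) : 3 ≤ pvRk f ↔
    (f = "risk_acceptance_not_signed" ∨ f = "formal_model_missing" ∨ f = "spec_missing" ∨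
      f = "emergency_mechanism_missing") := by
  rw [pv_rk_val f]; split_ifs <;> simp_all

lemma pv_rk2 (f : String) : 2 ≤ pvRk f ↔
    (f = "risk_acceptance_not_signed" ∨ f = "formal_model_missing" ∨ f = "spec_missing" ∨
      f = "emergency_mechanism_missing" ∨ f = "governance_latency_exceeded") := by
  rw [pv_rk_val f]; split_ifs <;> simp_all
  all_goals tauto

lemma pv_rk1 (f : String) : 1 ≤ pvRk f ↔
    (f = "risk_acceptance_not_signed" ∨ f = "formal_model_missing" ∨ f = "spec_missing" ∨
      f = "emergency_mechanism_missing" ∨ f = "governance_latency_exceeded" ∨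
      f = "low_liquidity" ∨ f = "monitoring_not_defined") := by
  rw [pv_rk_val f]; split_ifs <;> simp_all
  all_goals tauto

lemma pv_step (b : Nat) (f : String) :
    (match PySem.Dict.get? pvPriority f with
     | some e => if e.1 > b then e else (b, pvRes b)
     | none => (b, pvRes b)) = (max b (pvRk f), pvRes (max b (pvRk f))) := by
  rw [pv_get_eq f]
  by_cases h0 : pvRk f = 0
  · simp only [h0, if_pos]
    have : max b 0 = b := by omega
    rw [this]
  · simp only [if_neg h0]
    by_cases h : pvRk f > b
    · have hm : max b (pvRk f) = pvRk f := by omega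
      simp [h, hm]
    · have hm : max b (pvRk f) = b := by omega
      simp [h, hm]

lemma pv_fold_eq (l : List String) (b : Nat) :
    l.foldl
      (fun acc f =>
        match PySem.Dict.get? pvPriority f with
        | some e => if e.1 > acc.1 then e else acc
        | none => acc)
      (b, pvRes b) = (max b (pvMaxR l), pvRes (max b (pvMaxR l))) := by
  induction l generalizing b with
  | nil => simp [pvMaxR]
  | cons f l ih =>
      rw [List.foldl_cons]
      show l.foldl _
        (match PySem.Dict.get? pvPriority f with
         | some e => if e.1 > b then e else (b, pvRes b)
         | none => (b, pvRes b)) = _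
      rw [pv_step b f, ih (max b (pvRk f))]
      have hm : max (max b (pvRk f)) (pvMaxR l) = max b (pvMaxR (f :: l)) := by
        rw [pvMaxR_cons]; omega
      rw [hm]

lemma pv_alt_eq (l : List String) : determine_recommendation_alt l = pvRes (pvMaxR l) := by
  unfold determine_recommendation_alt
  have h : ((0 : Nat), (("APPROVE", "LOW") : String × String)) = (0, pvRes 0) := by
    simp [pvRes]
  rw [h, pv_fold_eq l 0]
  simp

lemma pv_maxR_ge (l : List String) (k : Nat) (hk : 1 ≤ k) :
    k ≤ pvMaxR l ↔ ∃ f ∈ l, k ≤ pvRk f := by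
  induction l with
  | nil => simp [pvMaxR]; omega
  | cons f l ih =>
      rw [pvMaxR_cons]
      constructor
      · intro h
        by_cases hf : k ≤ pvRk f
        · exact ⟨f, by simp, hf⟩
        · have : k ≤ pvMaxR l := by omega
          obtain ⟨g, hg, hgk⟩ := ih.mp this
          exact ⟨g, by simp [hg], hgk⟩
      · rintro ⟨g, hg, hgk⟩
        rcases List.mem_cons.mp hg with rfl | hg'
        · omega
        · have := ih.mpr ⟨g, hg', hgk⟩
          omega

lemma pv_maxR_le (l : List String) : pvMaxR l ≤ 3 := by
  induction l with
  | nil => simp [pvMaxR]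
  | cons f l ih =>
      rw [pvMaxR_cons]
      have := pvRk_le f
      omega

lemma pv_A_eq (l : List String) : determine_recommendation l = pvRes (pvMaxR l) := by
  unfold determine_recommendation
  by_cases h3 : 3 ≤ pvMaxR l
  · have hmax : pvMaxR l = 3 := le_antisymm (pv_maxR_le l) h3
    obtain ⟨f, hf, hrk⟩ := (pv_maxR_ge l 3 (by omega)).mp h3
    have hcond : (["risk_acceptance_not_signed", "formal_model_missing", "spec_missing",
        "emergency_mechanism_missing"].any (fun g => l.contains g)) = true := by
      rcases (pv_rk3 f).mp hrk with rfl | rfl | rfl | rfl <;> simp [hf]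
    rw [if_pos hcond, hmax]
    rfl
  · have hno3 : ¬ (["risk_acceptance_not_signed", "formal_model_missing", "spec_missing",
        "emergency_mechanism_missing"].any (fun g => l.contains g)) = true := by
      intro hc
      simp only [List.any_eq_true, List.contains_iff_mem] at hc
      obtain ⟨g, hg, hgl⟩ := hc
      apply h3
      refine (pv_maxR_ge l 3 (by omega)).mpr ⟨g, hgl, (pv_rk3 g).mpr ?_⟩
      fin_cases hg <;> simp
    rw [if_neg hno3]
    by_cases h2 : 2 ≤ pvMaxR l
    · have hmax : pvMaxR l = 2 := by omega
      obtain ⟨f, hf, hrk⟩ := (pv_maxR_ge l 2 (by omega)).mp h2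
      have hfg : f = "governance_latency_exceeded" := by
        rcases (pv_rk2 f).mp hrk with rfl | rfl | rfl | rfl | rfl
        · exact absurd ((pv_maxR_ge l 3 (by omega)).mpr ⟨_, hf, by rw [pv_rk3]; tauto⟩) h3
        · exact absurd ((pv_maxR_ge l 3 (by omega)).mpr ⟨_, hf, by rw [pv_rk3]; tauto⟩) h3
        · exact absurd ((pv_maxR_ge l 3 (by omega)).mpr ⟨_, hf, by rw [pv_rk3]; tauto⟩) h3
        · exact absurd ((pv_maxR_ge l 3 (by omega)).mpr ⟨_, hf, by rw [pv_rk3]; tauto⟩) h3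
        · rfl
      subst hfg
      rw [if_pos (by simp [hf])]
      rw [hmax]
      rfl
    · have hnog : ¬ (l.contains "governance_latency_exceeded") = true := by
        intro hc
        rw [List.contains_iff_mem] at hc
        exact h2 ((pv_maxR_ge l 2 (by omega)).mpr
          ⟨_, hc, (pv_rk2 "governance_latency_exceeded").mpr (by tauto)⟩)
      rw [if_neg hnog]
      by_cases h1 : 1 ≤ pvMaxR l
      · have hmax : pvMaxR l = 1 := by omega
        obtain ⟨f, hf, hrk⟩ := (pv_maxR_ge l 1 (by omega)).mp h1
        have hfm : f = "low_liquidity" ∨ f = "monitoring_not_defined" := by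
          rcases (pv_rk1 f).mp hrk with rfl | rfl | rfl | rfl | rfl | rfl | rfl
          · exact absurd ((pv_maxR_ge l 3 (by omega)).mpr ⟨_, hf, by rw [pv_rk3]; tauto⟩) h3
          · exact absurd ((pv_maxR_ge l 3 (by omega)).mpr ⟨_, hf, by rw [pv_rk3]; tauto⟩) h3
          · exact absurd ((pv_maxR_ge l 3 (by omega)).mpr ⟨_, hf, by rw [pv_rk3]; tauto⟩) h3
          · exact absurd ((pv_maxR_ge l 3 (by omega)).mpr ⟨_, hf, by rw [pv_rk3]; tauto⟩) h3
          · exact absurd ((pv_maxR_ge l 2 (by omega)).mpr ⟨_, hf, by rw [pv_rk2]; tauto⟩) h2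
          · exact Or.inl rfl
          · exact Or.inr rfl
        have hcond : (["low_liquidity", "monitoring_not_defined"].any
            (fun g => l.contains g)) = true := by
          rcases hfm with rfl | rfl <;> simp [hf]
        rw [if_pos hcond, hmax]
        rfl
      · have hnom : ¬ (["low_liquidity", "monitoring_not_defined"].any
            (fun g => l.contains g)) = true := by
          intro hc
          simp only [List.any_eq_true, List.contains_iff_mem] at hc
          obtain ⟨g, hg, hgl⟩ := hc
          apply h1
          refine (pv_maxR_ge l 1 (by omega)).mpr ⟨g, hgl, (pv_rk1 g).mpr ?_⟩
          fin_cases hg <;> simp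
        rw [if_neg hnom]
        have hmax : pvMaxR l = 0 := by omega
        rw [hmax]
        rfl

-- ===== VERDICT (by name: the statement is the Claim_ definition above) =====
theorem determine_recommendation_spec : Claim_equal_determine_recommendation := by
  intro l _
  unfold Spec_determine_recommendation
  rw [pv_A_eq, pv_alt_eq]
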